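-- pv_equiv track=rewrite | github.com/Xuth/covid_graph | read_data.py | fixPADeaths
-- ===== SOURCE A (Python) =====
-- def fixPADeaths(da):
--     """
--     on entry 46 (0 based), PA added an additional 254 deaths, most of which should
--     have been counted earlier.  So let's shift them a bit
--     """
--     ret = []
--
--     totAdded = 0
--     for i,v in enumerate(da):
--
--         if i > 25 and i < 46:
--             totAdded += 10
--             v += totAdded
--         ret.append(v)
--
--     print (totAdded)
--     return ret
-- ===== SOURCE B (Python) =====
-- def fixPADeaths(da):
--     """
--     on entry 46 (0 based), PA added an additional 254 deaths, most of which should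
--     have been counted earlier.  So let's shift them a bit
--     """
--     print(10 * max(0, min(len(da), 46) - 26))
--     return [v + 10 * (i - 25) if 26 <= i <= 45 else v for i, v in enumerate(da)]
-- ===== Notes on version B (the rewrite author's own statement) =====
-- stated objective: simpler
-- what changed: Replaces the stateful running accumulator with a stateless comprehension computing each element's offset 10*(i-25) in closed form from its index, and prints the total via a closed-form formula on len(da).
import Mathlib
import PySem

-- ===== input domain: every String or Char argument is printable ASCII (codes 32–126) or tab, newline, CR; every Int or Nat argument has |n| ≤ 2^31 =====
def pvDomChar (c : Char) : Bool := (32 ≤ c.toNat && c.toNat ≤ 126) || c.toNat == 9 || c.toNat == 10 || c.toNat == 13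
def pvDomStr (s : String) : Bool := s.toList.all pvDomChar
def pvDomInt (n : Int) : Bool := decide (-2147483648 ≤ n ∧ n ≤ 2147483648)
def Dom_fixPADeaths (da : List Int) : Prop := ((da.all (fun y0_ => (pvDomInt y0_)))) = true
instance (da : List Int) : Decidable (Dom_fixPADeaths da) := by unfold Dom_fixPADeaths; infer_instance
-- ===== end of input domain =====

-- ===== PORT A =====
-- B replaces A's running accumulator with a stateless closed-form per-index offset (objective: simpler).
-- Both Pythons print the loop's/formula's total; the equivalence proved here is about the return value only.
def fixPADeaths (da : List Int) : List Int :=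
  ((PySem.List.enumerate da).foldl
    (fun (st : List Int × Int) iv =>
      if iv.1 > 25 ∧ iv.1 < 46 then (st.1 ++ [iv.2 + (st.2 + 10)], st.2 + 10)
      else (st.1 ++ [iv.2], st.2)) ([], 0)).1

-- ===== PORT B =====
def fixPADeaths_alt (da : List Int) : List Int :=
  (PySem.List.enumerate da).map
    (fun iv => if 26 ≤ iv.1 ∧ iv.1 ≤ 45 then iv.2 + 10 * (iv.1 - 25) else iv.2)

-- ===== PRECONDITION & SPEC =====
def Spec_fixPADeaths (da : List Int) (out : List Int) : Prop := out = fixPADeaths_alt da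
instance (da : List Int) (out : List Int) : Decidable (Spec_fixPADeaths da out) := by unfold Spec_fixPADeaths; infer_instance

-- ===== CLAIM (what is proved, stated in full; the proofs are below) =====
def Claim_equal_fixPADeaths : Prop := ∀ (da : List Int), Dom_fixPADeaths da → Spec_fixPADeaths da (fixPADeaths da)

-- ===== LEMMAS AND PROOFS =====
-- Loop invariant: when the fold reaches index s (s ≥ 0), the accumulator's total is
-- 10 * (max (min s 46) 26 - 26), and the fold appends exactly B's closed-form elements.
theorem fixPADeaths_loop (da : List Int) : ∀ (s : Int) (acc : List Int), 0 ≤ s →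
    ((PySem.List.enumerate da s).foldl
      (fun (st : List Int × Int) iv =>
        if iv.1 > 25 ∧ iv.1 < 46 then (st.1 ++ [iv.2 + (st.2 + 10)], st.2 + 10)
        else (st.1 ++ [iv.2], st.2)) (acc, 10 * (max (min s 46) 26 - 26))).1
    = acc ++ (PySem.List.enumerate da s).map
        (fun iv => if 26 ≤ iv.1 ∧ iv.1 ≤ 45 then iv.2 + 10 * (iv.1 - 25) else iv.2) := by
  induction da with
  | nil => intro s acc _; simp [PySem.List.enumerate_nil]
  | cons v tl ih =>
    intro s acc hs
    rw [PySem.List.enumerate_cons]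
    simp only [List.foldl_cons, List.map_cons]
    by_cases h : s > 25 ∧ s < 46
    · have h1 : (10 : Int) * (max (min s 46) 26 - 26) + 10
          = 10 * (max (min (s + 1) 46) 26 - 26) := by omega
      rw [if_pos h, if_pos (by omega : 26 ≤ s ∧ s ≤ 45)]
      simp only [h1, ih (s + 1) _ (by omega)]
      simp
      omega
    · have h1 : ¬ (26 ≤ s ∧ s ≤ 45) := by omega
      have h2 : (10 : Int) * (max (min s 46) 26 - 26)
          = 10 * (max (min (s + 1) 46) 26 - 26) := by omega
      rw [if_neg h, if_neg h1]
      simp only [h2, ih (s + 1) _ (by omega)]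
      simp

-- ===== VERDICT (by name: the statement is the Claim_ definition above) =====
theorem fixPADeaths_spec : Claim_equal_fixPADeaths := by
  intro da _
  unfold Spec_fixPADeaths fixPADeaths fixPADeaths_alt
  have h := fixPADeaths_loop da 0 [] le_rfl
  simpa using h
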